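-- pv_equiv track=rewrite | github.com/arturormk/curator-seed-python | scripts/validate_recipe.py | _check_heading_order
-- ===== SOURCE A (Python) =====
-- def _extract_headings(markdown_body: str) -> list[str]:
--     """Return the text of headings that start with '## ' only."""
--     headings: list[str] = []
--     for line in markdown_body.splitlines():
--         # we care only about second-level headings, literally starting with "## "
--         if line.startswith("## "):
--             heading_text = line[len("## ") :].strip()
--             if heading_text:
--                 headings.append(heading_text)
--     return headings
--
-- def _check_heading_order(markdown_body: str, expected_order: list[str]) -> list[str]:
--     """
--     Check that:
--       - for each expected heading text E in expected_order,
--       - there is a corresponding '## ' heading whose text CONTAINS E,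
--       - and they appear in the same order.
--
--     Extra headings are allowed; mismatch in order or missing headings is an error.
--     """
--     errors: list[str] = []
--     actual = _extract_headings(markdown_body)
--
--     # Greedy left-to-right match where each expected string must appear
--     # as a substring of some heading, in order.
--     idx = 0
--     matched: list[str] = []
--     for expected in expected_order:
--         found_at = None
--         while idx < len(actual):
--             if expected in actual[idx]:
--                 found_at = idx
--                 matched.append(actual[idx])
--                 idx += 1
--                 break
--             idx += 1
--         if found_at is None:
--             errors.append(
--                 f"Missing or out-of-order heading containing: {expected!r}.\n"
--                 f"  All '## ' headings: {actual}"
--             )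
--             # stop early; further checks won't be meaningful
--             return errors
--
--     # Optional: if you want to ensure there are no unexpected extra headings
--     # or stricter equality, you could add more checks here.
--     return errors
-- ===== SOURCE B (Python) =====
-- def _extract_headings(markdown_body: str) -> list[str]:
--     """Return the text of headings that start with '## ' only."""
--     headings: list[str] = []
--     for line in markdown_body.splitlines():
--         if line.startswith("## "):
--             heading_text = line[len("## ") :].strip()
--             if heading_text:
--                 headings.append(heading_text)
--     return headings
--
-- def _check_heading_order(markdown_body: str, expected_order: list[str]) -> list[str]:
--     """Index-based check: first build, for every expected string, the sorted list of
--     heading positions whose text contains it; then chain successor queries over those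
--     occurrence lists (each expected must match at a strictly later position than the
--     previous one).  Same greedy result, but via a precomputed index instead of an
--     online scan over the headings."""
--     actual = _extract_headings(markdown_body)
--     occurrences = [[i for i in range(len(actual)) if e in actual[i]] for e in expected_order]
--     pos = -1
--     for e, positions in zip(expected_order, occurrences):
--         nxt = None
--         for i in positions:
--             if i > pos:
--                 nxt = i
--                 break
--         if nxt is None:
--             return [
--                 f"Missing or out-of-order heading containing: {e!r}.\n"
--                 f"  All '## ' headings: {actual}"
--             ]
--         pos = nxt
--     return []
-- ===== Notes on version B (the rewrite author's own statement) =====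
-- stated objective: alternative
-- what changed: B replaces A's online two-pointer scan (outer loop over expected, inner while over the headings with idx/matched/found_at state) by a staged index: it first precomputes, for every expected string, the sorted list of heading positions containing it, then chains successor queries (first position strictly after the previous match) over those occurrence lists.
import Mathlib
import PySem

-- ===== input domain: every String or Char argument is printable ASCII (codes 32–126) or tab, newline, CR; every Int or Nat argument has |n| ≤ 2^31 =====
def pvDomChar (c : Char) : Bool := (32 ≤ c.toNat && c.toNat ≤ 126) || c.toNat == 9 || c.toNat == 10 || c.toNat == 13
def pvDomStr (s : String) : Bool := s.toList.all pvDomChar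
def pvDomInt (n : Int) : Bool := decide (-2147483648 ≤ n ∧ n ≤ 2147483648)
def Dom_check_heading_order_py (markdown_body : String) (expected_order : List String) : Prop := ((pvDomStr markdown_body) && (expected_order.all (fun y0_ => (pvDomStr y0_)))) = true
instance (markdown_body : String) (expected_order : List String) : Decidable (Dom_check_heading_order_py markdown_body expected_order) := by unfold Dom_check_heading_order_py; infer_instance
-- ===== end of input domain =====

-- B replaces A's online two-pointer scan by a staged index: it precomputes, for every
-- expected string, the list of heading positions containing it, then chains successor
-- queries over those occurrence lists (alternative decomposition, not faster).

-- ===== SHARED HELPERS (identical Python in A and B: _extract_headings and the f-string/repr message) =====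
-- Python repr(str) for ASCII/tab/newline/CR, as this Python produces it
def pvReprChar (q : Char) (c : Char) : List Char :=
  if c = '\\' then ['\\', '\\']
  else if c = q then ['\\', q]
  else if c = Char.ofNat 9 then ['\\', 't']
  else if c = Char.ofNat 10 then ['\\', 'n']
  else if c = Char.ofNat 13 then ['\\', 'r']
  else [c]

def pvReprStr (s : String) : List Char :=
  let cs := s.toList
  let q : Char := if cs.contains '\'' && !(cs.contains '"') then '"' else '\''
  q :: cs.flatMap (pvReprChar q) ++ [q]

def pvReprStrList (xs : List String) : List Char :=
  '[' :: (PySem.Chars.join [',', ' '] (xs.map pvReprStr)) ++ [']']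

def pvMissingMsg (expected : String) (actual : List String) : String :=
  String.ofList ("Missing or out-of-order heading containing: ".toList
    ++ pvReprStr expected ++ ".\n  All '## ' headings: ".toList
    ++ pvReprStrList actual)

-- _extract_headings: loop appending to an accumulator (identical in both sources)
def extractHeadings (markdown_body : String) : List String :=
  (PySem.Str.splitlines markdown_body).foldl (fun headings line =>
    if PySem.Str.startswith line "## " then
      let heading_text := PySem.Str.strip (PySem.Str.slice line (some 3) none)
      if heading_text ≠ "" then headings ++ [heading_text] else headings
    else headings) []

-- ===== PORT A =====
-- inner 'while idx < len(actual)' scan: some idx' = the idx after the break, none = exhausted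
def aScan (actual : List String) (expected : String) (idx : Nat) : Option Nat :=
  if h : idx < actual.length then
    if PySem.Str.isIn expected actual[idx] then some (idx + 1)
    else aScan actual expected (idx + 1)
  else none
termination_by actual.length - idx

-- outer 'for expected in expected_order' loop; matched is carried as in A (it never reaches the output)
def aLoop (actual : List String) (exp : List String) (idx : Nat) (matched : List String) : List String :=
  match exp with
  | [] => []
  | expected :: rest =>
    match aScan actual expected idx with
    | some idx' => aLoop actual rest idx' (matched ++ [actual.getD (idx' - 1) ""])
    | none => [pvMissingMsg expected actual]

def check_heading_order_py (markdown_body : String) (expected_order : List String) : List String :=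
  let actual := extractHeadings markdown_body
  aLoop actual expected_order 0 []

-- ===== PORT B =====
-- occurrence index for one expected string: [i for i in range(len(actual)) if e in actual[i]]
-- (indices are in range and non-negative, so Nat range with getD is exact here)
def occB (actual : List String) (e : String) : List Nat :=
  (List.range actual.length).filter (fun i => PySem.Str.isIn e (actual.getD i ""))

-- inner 'for i in positions: if i > pos: nxt = i; break'
def bSucc (positions : List Nat) (pos : Int) : Option Nat :=
  match positions with
  | [] => none
  | i :: rest => if pos < (i : Int) then some i else bSucc rest pos

-- 'for e, positions in zip(expected_order, occurrences)' chaining successor queries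
def bChain (actual : List String) (pairs : List (String × List Nat)) (pos : Int) : List String :=
  match pairs with
  | [] => []
  | (e, positions) :: rest =>
    match bSucc positions pos with
    | some i => bChain actual rest (i : Int)
    | none => [pvMissingMsg e actual]

def check_heading_order_py_alt (markdown_body : String) (expected_order : List String) : List String :=
  let actual := extractHeadings markdown_body
  let occurrences := expected_order.map (occB actual)
  bChain actual (expected_order.zip occurrences) (-1)

-- ===== PRECONDITION & SPEC =====
def Spec_check_heading_order_py (markdown_body : String) (expected_order : List String) (out : List String) : Prop := out = check_heading_order_py_alt markdown_body expected_order
instance (markdown_body : String) (expected_order : List String) (out : List String) : Decidable (Spec_check_heading_order_py markdown_body expected_order out) := by unfold Spec_check_heading_order_py; infer_instance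

-- ===== CLAIM (what is proved, stated in full; the proofs are below) =====
def Claim_equal_check_heading_order_py : Prop := ∀ (markdown_body : String) (expected_order : List String), Dom_check_heading_order_py markdown_body expected_order → Spec_check_heading_order_py markdown_body expected_order (check_heading_order_py markdown_body expected_order)

-- ===== LEMMAS AND PROOFS =====

lemma succ_filter (p : Nat → Bool) (l : List Nat) (pos : Int) :
    bSucc (l.filter p) pos = l.find? (fun i => p i && decide (pos < (i : Int))) := by
  induction l with
  | nil => rfl
  | cons a as ih =>
    by_cases h : p a = true
    · by_cases h2 : pos < (a : Int) <;> simp [h, bSucc, h2, ih]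
    · simp [h, ih]

lemma pred_cast (p : Nat → Bool) (k : Nat) :
    (fun i : Nat => p i && decide ((k : Int) - 1 < (i : Int))) = (fun i => p i && decide (k ≤ i)) := by
  funext i
  have : ((k : Int) - 1 < (i : Int)) ↔ (k ≤ i) := by omega
  rw [decide_eq_decide.mpr this]

lemma find_range_none (p : Nat → Bool) (n k : Nat) (h : n ≤ k) :
    (List.range n).find? (fun i => p i && decide (k ≤ i)) = none := by
  rw [List.find?_eq_none]
  intro x hx
  simp only [List.mem_range] at hx
  simp only [Bool.and_eq_true, decide_eq_true_eq, not_and]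
  intro _
  omega

lemma find_range_step (p : Nat → Bool) (n k : Nat) (h : k < n) :
    (List.range n).find? (fun i => p i && decide (k ≤ i)) =
    if p k then some k else (List.range n).find? (fun i => p i && decide (k + 1 ≤ i)) := by
  induction n with
  | zero => omega
  | succ n ih =>
    by_cases hk : k < n
    · rw [List.range_succ, List.find?_append, List.find?_append, ih hk]
      by_cases hp : p k = true
      · simp [hp]
      · have e1 : (List.find? (fun i => p i && decide (k ≤ i)) [n]) =
            (List.find? (fun i => p i && decide (k + 1 ≤ i)) [n]) := by
          simp only [List.find?]
          have b1 : decide (k ≤ n) = true := by simp; omega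
          have b2 : decide (k + 1 ≤ n) = true := by simp; omega
          rw [b1, b2]
        rw [if_neg hp, if_neg hp, e1]
    · have hkn : k = n := by omega
      subst hkn
      rw [List.range_succ, List.find?_append, find_range_none p k k (le_refl k)]
      simp only [Option.none_or, List.find?]
      have b1 : decide (k ≤ k) = true := by simp
      rw [b1]
      by_cases hp : p k = true
      · simp [hp]
      · rw [if_neg hp, List.find?_append, find_range_none p k (k + 1) (by omega)]
        simp [hp, List.find?]

lemma scan_find (actual : List String) (e : String) (k : Nat) :
    aScan actual e k =
      ((List.range actual.length).find?
        (fun i => PySem.Str.isIn e (actual.getD i "") && decide (k ≤ i))).map (· + 1) := by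
  by_cases h : k < actual.length
  · have hg : actual.getD k "" = actual[k] := List.getD_eq_getElem actual "" h
    rw [aScan, dif_pos h, find_range_step _ _ _ h, hg]
    by_cases hp : PySem.Str.isIn e actual[k] = true
    · rw [if_pos hp, if_pos hp]; rfl
    · rw [if_neg hp, if_neg hp, scan_find actual e (k + 1)]
  · rw [aScan, dif_neg h, find_range_none _ _ _ (Nat.le_of_not_lt h)]
    rfl
termination_by actual.length - k

lemma chain_loop (actual : List String) (exp : List String) (k : Nat) (matched : List String) :
    aLoop actual exp k matched =
      bChain actual (exp.zip (exp.map (occB actual))) ((k : Int) - 1) := by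
  induction exp generalizing k matched with
  | nil => rfl
  | cons e es ih =>
    have hb : bSucc (occB actual e) ((k : Int) - 1) =
        (List.range actual.length).find?
          (fun i => PySem.Str.isIn e (actual.getD i "") && decide (k ≤ i)) := by
      rw [occB, succ_filter, pred_cast]
    rw [List.map_cons, List.zip_cons_cons, bChain, hb, aLoop, scan_find]
    cases hf : (List.range actual.length).find?
        (fun i => PySem.Str.isIn e (actual.getD i "") && decide (k ≤ i)) with
    | none => rfl
    | some i =>
      simp only [Option.map_some]
      have : (i : Int) = ((i + 1 : Nat) : Int) - 1 := by push_cast; ring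
      rw [ih (i + 1) (matched ++ [actual.getD (i + 1 - 1) ""]), this]

-- ===== VERDICT (by name: the statement is the Claim_ definition above) =====
theorem check_heading_order_py_spec : Claim_equal_check_heading_order_py := by
  intro md exp _
  unfold Spec_check_heading_order_py check_heading_order_py check_heading_order_py_alt
  simp only []
  rw [chain_loop]
  norm_num
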